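-- pv_equiv track=rewrite | github.com/lumumba11/Markdown-demo | greedfox.py | fox_farmer_grain_graph_search
-- ===== SOURCE A (Python) =====
-- def fox_farmer_grain_graph_search(start, end, fox, farmer, grain):
--     """
--     Graph search solution for the Fox, Farmer, and Grain problem.
--
--     Args:
--         start: Starting location ('left' or 'right')
--         end: Destination location ('left' or 'right')
--         fox: Location of the fox ('left' or 'right')
--         farmer: Location of the farmer ('left' or 'right')
--         grain: Location of the grain ('left' or 'right')
--
--     Returns:
--         The number of moves required to solve the problem
--     """
--
--     # Define the possible moves
--     moves = {
--         'left': 'right',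
--         'right': 'left'
--     }
--
--     # Define the initial state
--     initial_state = (fox, farmer, grain, start)
--
--     # Define the goal state
--     goal_state = (fox, farmer, grain, end)
--
--     # Define the transition function
--     def transition(state):
--         new_states = []
--         f, x, g, loc = state
--
--         # Generate successor states based on moving the farmer
--         for f_loc in moves:
--             if f_loc != loc:
--                 # Fox and grain can't be left alone without the farmer
--                 if x == g and f == f_loc:
--                     continue
--                 new_states.append((f, x, g, f_loc))
--
--         # Generate successor states based on moving the fox or grain
--         if f == loc:
--             for item in [x, g]:
--                 for item_loc in moves:
--                     if item_loc != loc and item != item_loc: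
--                         new_states.append((f, item_loc if item == x else x, item_loc if item == g else g, item_loc))
--         return new_states
--
--     # Define the search function
--     def search(initial_state, goal_state):
--         frontier = [(initial_state, [])]  # Queue of (state, path) pairs
--         explored = set()
--
--         while frontier:
--             state, path = frontier.pop(0)
--             loc = state[-1]
--
--             if state == goal_state:
--                 return path
--
--             if state in explored:
--                 continue
--
--             explored.add(state)
--
--             for next_state in transition(state):
--                 frontier.append((next_state, path + [next_state[-1]]))
--
--         return None
--
--     # Run the search
--     path = search(initial_state, goal_state)
--
--     return len(path) if path else None
-- ===== SOURCE B (Python) =====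
-- # Generation-by-generation frontier iteration instead of A's FIFO queue of
-- # (state, path) pairs with an explored set: B keeps only the set of states
-- # reachable in exactly `depth` moves and returns the loop index at the first
-- # generation containing the goal.  Intended difference: when start == end,
-- # A returns None (empty path is falsy); B returns 0.
--
-- def _successors(state):
--     f, x, g, loc = state
--     out = []
--     for side in ('left', 'right'):
--         if side != loc and not (x == g and f == side):
--             out.append((f, x, g, side))
--     if f == loc:
--         for item in (x, g):
--             for side in ('left', 'right'):
--                 if side != loc and item != side:
--                     out.append((f,
--                                 side if x == item else x,
--                                 side if g == item else g,
--                                 side))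
--     return out
--
--
-- def fox_farmer_grain_graph_search(start, end, fox, farmer, grain):
--     goal = (fox, farmer, grain, end)
--     frontier = {(fox, farmer, grain, start)}
--     # at most 27 distinct states are ever reachable, so a shortest solution
--     # takes at most 27 moves: 28 generations decide the problem
--     for depth in range(28):
--         if goal in frontier:
--             return depth
--         frontier = {t for s in frontier for t in _successors(s)}
--     return None
-- ===== Notes on version B (the rewrite author's own statement) =====
-- stated objective: simpler
-- what changed: B drops A's FIFO queue of (state, path) pairs and its explored set entirely: it iterates the set of states reachable in exactly d moves (frontier := successors of frontier) for d = 0..27 (the state space has at most 27 states, so 28 generations decide the problem) and returns the first d whose generation contains the goal.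
-- intended difference: When start == end (the problem is already solved), A returns None because the empty path is falsy in 'len(path) if path else None'; B returns 0, the number of moves actually required, which is the intended answer. — e.g. on fox_farmer_grain_graph_search("left", "left", "left", "left", "left"): A returns none, B returns some 0
import Mathlib
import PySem

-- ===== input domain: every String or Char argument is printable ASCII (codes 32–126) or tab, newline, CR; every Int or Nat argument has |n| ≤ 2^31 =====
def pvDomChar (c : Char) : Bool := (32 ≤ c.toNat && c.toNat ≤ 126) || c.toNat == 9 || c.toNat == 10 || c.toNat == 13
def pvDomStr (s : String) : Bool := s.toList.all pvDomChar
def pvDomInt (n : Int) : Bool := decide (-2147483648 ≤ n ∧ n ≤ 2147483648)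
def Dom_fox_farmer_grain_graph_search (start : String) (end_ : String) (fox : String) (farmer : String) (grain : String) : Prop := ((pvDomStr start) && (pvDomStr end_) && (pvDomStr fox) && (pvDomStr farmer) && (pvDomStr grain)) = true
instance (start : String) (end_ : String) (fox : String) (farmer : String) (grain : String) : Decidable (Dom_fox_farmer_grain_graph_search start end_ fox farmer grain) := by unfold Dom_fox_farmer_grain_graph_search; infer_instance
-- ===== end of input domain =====

-- B replaces A's FIFO queue of (state, path) pairs and its explored set by a bounded
-- iteration of exact-depth frontier sets (successors of the previous generation),
-- returning the loop index of the first generation containing the goal (objective: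
-- simpler). Intended difference: when start == end, A returns None (the empty path
-- is falsy in 'len(path) if path else None'), B returns 0.

-- ===== PORT A =====
abbrev PvSt := String × String × String × String

-- keys of the 'moves' dict, in insertion order
def pvMoves : List String := ["left", "right"]

-- transition(state): farmer moves first, then (if the farmer is present) fox/grain moves
def pvTransition (s : PvSt) : List PvSt :=
  let f := s.1; let x := s.2.1; let g := s.2.2.1; let loc := s.2.2.2
  let n1 := pvMoves.foldl (fun acc f_loc =>
    if f_loc != loc then
      (if x == g && f == f_loc then acc else acc ++ [(f, x, g, f_loc)])
    else acc) []
  if f == loc then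
    ([x, g]).foldl (fun acc item =>
      pvMoves.foldl (fun acc item_loc =>
        if item_loc != loc && item != item_loc then
          acc ++ [(f, if item == x then item_loc else x,
                      if item == g then item_loc else g, item_loc)]
        else acc) acc) n1
  else n1

-- the while-loop of search(); the fuel only guards totality and is never exhausted:
-- the loop pops at most 1 + 7*27 entries for any strings (≤ 27 reachable states,
-- ≤ 6 successors each), so 500 iterations always suffice (proved via pvGoA_stable)
def pvGoA (goal : PvSt) : Nat → List (PvSt × List String) → PySem.Set PvSt → Option (List String)
  | 0, _, _ => none
  | _ + 1, [], _ => none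
  | n + 1, (s, p) :: rest, ex =>
      if s == goal then some p
      else if PySem.Set.contains ex s then pvGoA goal n rest ex
      else pvGoA goal n (rest ++ (pvTransition s).map (fun ns => (ns, p ++ [ns.2.2.2])))
             (PySem.Set.add ex s)

def fox_farmer_grain_graph_search (start : String) (end_ : String) (fox : String) (farmer : String) (grain : String) : Option Int :=
  let initial_state : PvSt := (fox, farmer, grain, start)
  let goal_state : PvSt := (fox, farmer, grain, end_)
  match pvGoA goal_state 500 [(initial_state, [])] PySem.Set.empty with
  | none => none
  | some p => if p == [] then none else some (p.length : Int)   -- len(path) if path else None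

-- ===== PORT B =====
-- _successors(state) from Source B (merged guard, flipped equality tests)
def pvSuccB (s : PvSt) : List PvSt :=
  let f := s.1; let x := s.2.1; let g := s.2.2.1; let loc := s.2.2.2
  let out := (["left", "right"]).foldl (fun out side =>
    if side != loc && !(x == g && f == side) then out ++ [(f, x, g, side)] else out) []
  if f == loc then
    ([x, g]).foldl (fun out item =>
      (["left", "right"]).foldl (fun out side =>
        if side != loc && item != side then
          out ++ [(f, if x == item then side else x,
                      if g == item then side else g, side)]
        else out) out) out
  else out

-- frontier = {t for s in frontier for t in _successors(s)}  (a set built from a set: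
-- membership does not depend on the iteration order)
def pvNextB (F : PySem.Set PvSt) : PySem.Set PvSt :=
  PySem.Set.ofList (F.flatMap pvSuccB)

-- 'for depth in range(28): …' with an early return; the counter is the remaining
-- number of iterations, depth the loop variable
def pvGoB (goal : PvSt) : Nat → PySem.Set PvSt → Int → Option Int
  | 0, _, _ => none
  | k + 1, F, depth =>
      if PySem.Set.contains F goal then some depth
      else pvGoB goal k (pvNextB F) (depth + 1)

def fox_farmer_grain_graph_search_alt (start : String) (end_ : String) (fox : String) (farmer : String) (grain : String) : Option Int :=
  let goal : PvSt := (fox, farmer, grain, end_)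
  pvGoB goal 28 (PySem.Set.ofList [(fox, farmer, grain, start)]) 0

-- ===== PRECONDITION & SPEC =====
-- When start == end the problem is already solved: A returns none (the empty path is
-- falsy in 'len(path) if path else None'), B returns some 0, the intended move count.
def D_fox_farmer_grain_graph_search (start : String) (end_ : String) (fox : String) (farmer : String) (grain : String) : Prop := start = end_
instance (start : String) (end_ : String) (fox : String) (farmer : String) (grain : String) : Decidable (D_fox_farmer_grain_graph_search start end_ fox farmer grain) := by unfold D_fox_farmer_grain_graph_search; infer_instance

def Spec_fox_farmer_grain_graph_search (start : String) (end_ : String) (fox : String) (farmer : String) (grain : String) (out : Option Int) : Prop := ¬ D_fox_farmer_grain_graph_search start end_ fox farmer grain → out = fox_farmer_grain_graph_search_alt start end_ fox farmer grain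
instance (start : String) (end_ : String) (fox : String) (farmer : String) (grain : String) (out : Option Int) : Decidable (Spec_fox_farmer_grain_graph_search start end_ fox farmer grain out) := by unfold Spec_fox_farmer_grain_graph_search; infer_instance

def pvDiffWitness_fox_farmer_grain_graph_search : String × String × String × String × String := ("left", "left", "left", "left", "left")
def pvDiffWitnessOut_fox_farmer_grain_graph_search : (Option Int) × (Option Int) := (none, some 0)

-- ===== CLAIM (what is proved, stated in full; the proofs are below) =====
def Claim_unchanged_fox_farmer_grain_graph_search : Prop := ∀ (start : String) (end_ : String) (fox : String) (farmer : String) (grain : String), Dom_fox_farmer_grain_graph_search start end_ fox farmer grain → Spec_fox_farmer_grain_graph_search start end_ fox farmer grain (fox_farmer_grain_graph_search start end_ fox farmer grain)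
def Claim_changed_fox_farmer_grain_graph_search : Prop := Dom_fox_farmer_grain_graph_search (pvDiffWitness_fox_farmer_grain_graph_search.1) (pvDiffWitness_fox_farmer_grain_graph_search.2.1) (pvDiffWitness_fox_farmer_grain_graph_search.2.2.1) (pvDiffWitness_fox_farmer_grain_graph_search.2.2.2.1) (pvDiffWitness_fox_farmer_grain_graph_search.2.2.2.2) ∧ D_fox_farmer_grain_graph_search (pvDiffWitness_fox_farmer_grain_graph_search.1) (pvDiffWitness_fox_farmer_grain_graph_search.2.1) (pvDiffWitness_fox_farmer_grain_graph_search.2.2.1) (pvDiffWitness_fox_farmer_grain_graph_search.2.2.2.1) (pvDiffWitness_fox_farmer_grain_graph_search.2.2.2.2) ∧ fox_farmer_grain_graph_search (pvDiffWitness_fox_farmer_grain_graph_search.1) (pvDiffWitness_fox_farmer_grain_graph_search.2.1) (pvDiffWitness_fox_farmer_grain_graph_search.2.2.1) (pvDiffWitness_fox_farmer_grain_graph_search.2.2.2.1) (pvDiffWitness_fox_farmer_grain_graph_search.2.2.2.2) = pvDiffWitnessOut_fox_farmer_grain_graph_search.1 ∧ fox_farmer_grain_graph_search_alt (pvDiffWitness_fox_farmer_grain_graph_search.1)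 (pvDiffWitness_fox_farmer_grain_graph_search.2.1) (pvDiffWitness_fox_farmer_grain_graph_search.2.2.1) (pvDiffWitness_fox_farmer_grain_graph_search.2.2.2.1) (pvDiffWitness_fox_farmer_grain_graph_search.2.2.2.2) = pvDiffWitnessOut_fox_farmer_grain_graph_search.2 ∧ pvDiffWitnessOut_fox_farmer_grain_graph_search.1 ≠ pvDiffWitnessOut_fox_farmer_grain_graph_search.2
def Claim_exact_fox_farmer_grain_graph_search : Prop := ∀ (start : String) (end_ : String) (fox : String) (farmer : String) (grain : String), Dom_fox_farmer_grain_graph_search start end_ fox farmer grain → D_fox_farmer_grain_graph_search start end_ fox farmer grain → fox_farmer_grain_graph_search start end_ fox farmer grain ≠ fox_farmer_grain_graph_search_alt start end_ fox farmer grain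

-- ===== LEMMAS AND PROOFS =====

abbrev PvEnt := PvSt × List String

theorem pv_beq_comm (a b : String) : (a == b) = (b == a) := by
  by_cases h : a = b
  · subst h; rfl
  · simp [h, Ne.symm h]


theorem pvSuccB_eq_transition (s : PvSt) : pvSuccB s = pvTransition s := by
  obtain ⟨f, x, g, loc⟩ := s
  simp only [pvSuccB, pvTransition, pvMoves]
  have e1 : (["left", "right"]).foldl (fun out side =>
      if side != loc && !(x == g && f == side) then out ++ [(f, x, g, side)] else out) ([] : List PvSt)
      = (["left", "right"]).foldl (fun acc f_loc =>
      if f_loc != loc then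
        (if x == g && f == f_loc then acc else acc ++ [(f, x, g, f_loc)])
      else acc) [] := by
    apply PySem.List.foldl_congr_mem
    intro acc side _
    cases h1 : side != loc <;> cases h2 : x == g && f == side <;> simp [h1, h2]
  rw [e1]
  by_cases hf : (f == loc) = true
  case neg => rw [if_neg hf, if_neg hf]
  rw [if_pos hf, if_pos hf]
  apply PySem.List.foldl_congr_mem
  intro acc item _
  apply PySem.List.foldl_congr_mem
  intro a side _
  rw [pv_beq_comm x item, pv_beq_comm g item]


theorem pvGoA_step (goal s : PvSt) (p : List String) (rest : List PvEnt) (ex : PySem.Set PvSt) (n : Nat) : pvGoA goal (n + 1) ((s, p) :: rest) ex = (if s == goal then some p else if PySem.Set.contains ex s then pvGoA goal n rest ex else pvGoA goal n (rest ++ (pvTransition s).map (fun ns => (ns, p ++ [ns.2.2.2]))) (PySem.Set.add ex s)) := rfl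


theorem pvGoA_nil (goal : PvSt) (n : Nat) (ex : PySem.Set PvSt) : pvGoA goal n [] ex = none := by
  cases n <;> rfl

-- shape of every successor: same fox, farmer/grain unchanged or a bank, location a bank

theorem pv_mem_foldl_or {α β : Type} (P : α → Prop) (f : List α → β → List α) :
    ∀ (l : List β) (acc : List α), (∀ a b t, b ∈ l → t ∈ f a b → t ∈ a ∨ P t) →
      ∀ t ∈ l.foldl f acc, t ∈ acc ∨ P t := by
  intro l
  induction l with
  | nil => intro acc _ t ht; exact Or.inl ht
  | cons b r ih =>
    intro acc hstep t ht
    have := ih (f acc b) (fun a b' t' hb' => hstep a b' t' (List.mem_cons_of_mem _ hb')) t ht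
    rcases this with h | h
    · rcases hstep acc b t (List.mem_cons_self) h with h' | h'
      · exact Or.inl h'
      · exact Or.inr h'
    · exact Or.inr h

theorem pv_foldl_len {α β : Type} (f : List α → β → List α) (c : Nat)
    (hstep : ∀ a b, (f a b).length ≤ a.length + c) :
    ∀ (l : List β) (acc : List α), (l.foldl f acc).length ≤ acc.length + c * l.length := by
  intro l
  induction l with
  | nil => intro acc; simp
  | cons b r ih =>
    intro acc
    calc (r.foldl f (f acc b)).length ≤ (f acc b).length + c * r.length := ih (f acc b)
      _ ≤ acc.length + c + c * r.length := by have := hstep acc b; omega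
      _ = acc.length + c * (b :: r).length := by simp [List.length_cons]; ring

theorem pvTransition_shape (s t : PvSt) (h : t ∈ pvTransition s) :
    t.1 = s.1 ∧ (t.2.1 = s.2.1 ∨ t.2.1 = "left" ∨ t.2.1 = "right")
      ∧ (t.2.2.1 = s.2.2.1 ∨ t.2.2.1 = "left" ∨ t.2.2.1 = "right")
      ∧ (t.2.2.2 = "left" ∨ t.2.2.2 = "right") := by
  obtain ⟨f, x, g, loc⟩ := s
  set P : PvSt → Prop := fun t =>
    t.1 = f ∧ (t.2.1 = x ∨ t.2.1 = "left" ∨ t.2.1 = "right")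
      ∧ (t.2.2.1 = g ∨ t.2.2.1 = "left" ∨ t.2.2.1 = "right")
      ∧ (t.2.2.2 = "left" ∨ t.2.2.2 = "right") with hP
  suffices h' : P t by exact h'
  simp only [pvTransition] at h
  have hn1 : ∀ t ∈ pvMoves.foldl (fun acc f_loc =>
      if f_loc != loc then
        (if x == g && f == f_loc then acc else acc ++ [(f, x, g, f_loc)])
      else acc) [], P t := by
    intro t ht
    have hstep : ∀ (a : List PvSt) (b : String) (t' : PvSt), b ∈ pvMoves → t' ∈ (if b != loc then (if x == g && f == b then a else a ++ [(f, x, g, b)]) else a) → t' ∈ a ∨ P t' := by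
      intro a b t' hb ht'
      have hb' : b = "left" ∨ b = "right" := by simpa [pvMoves] using hb
      split_ifs at ht' with h1 h2
      · exact Or.inl ht'
      · rcases List.mem_append.mp ht' with h' | h'
        · exact Or.inl h'
        · right
          simp only [List.mem_singleton] at h'
          subst h'
          rcases hb' with rfl | rfl <;> simp [hP]
      · exact Or.inl ht'
    rcases pv_mem_foldl_or P _ pvMoves [] hstep t ht with h' | h'
    · simp at h'
    · exact h'
  split_ifs at h with hf
  · have hstep2 : ∀ (a : List PvSt) (item : String) (t' : PvSt), item ∈ [x, g] → t' ∈ pvMoves.foldl (fun acc item_loc => if item_loc != loc && item != item_loc then acc ++ [(f, if item == x then item_loc else x, if item == g then item_loc else g, item_loc)] else acc) a → t' ∈ a ∨ P t' := by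
      intro a item t' hitem ht'
      have hstep3 : ∀ (a' : List PvSt) (b : String) (t'' : PvSt), b ∈ pvMoves → t'' ∈ (if b != loc && item != b then a' ++ [(f, if item == x then b else x, if item == g then b else g, b)] else a') → t'' ∈ a' ∨ P t'' := by
        intro a' b t'' hb ht''
        have hb' : b = "left" ∨ b = "right" := by simpa [pvMoves] using hb
        by_cases h1 : (b != loc && item != b) = true
        · rw [if_pos h1] at ht''
          rcases List.mem_append.mp ht'' with h'' | h''
          · exact Or.inl h''
          · right
            simp only [List.mem_singleton] at h''
            subst h''
            rcases hb' with rfl | rfl <;>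
              by_cases hx : (item == x) = true <;>
                by_cases hg2 : (item == g) = true <;>
                  simp [hP, hx, hg2]
        · rw [if_neg h1] at ht''
          exact Or.inl ht''
      rcases pv_mem_foldl_or P _ pvMoves a hstep3 t' ht' with h'' | h''
      · exact Or.inl h''
      · exact Or.inr h''
    rcases pv_mem_foldl_or P _ [x, g] _ hstep2 t h with h' | h'
    · exact hn1 t h'
    · exact h'
  · exact hn1 t h

theorem pvTransition_len (s : PvSt) : (pvTransition s).length ≤ 6 := by
  obtain ⟨f, x, g, loc⟩ := s
  simp only [pvTransition]
  have hn1 : (pvMoves.foldl (fun acc f_loc =>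
      if f_loc != loc then
        (if x == g && f == f_loc then acc else acc ++ [(f, x, g, f_loc)])
      else acc) ([] : List PvSt)).length ≤ 2 := by
    have hs : ∀ (a : List PvSt) (b : String), ((if b != loc then (if x == g && f == b then a else a ++ [(f, x, g, b)]) else a)).length ≤ a.length + 1 := by
      intro a b; split_ifs <;> simp
    have := pv_foldl_len (fun acc f_loc => if f_loc != loc then (if x == g && f == f_loc then acc else acc ++ [(f, x, g, f_loc)]) else acc) 1 hs pvMoves []
    simpa [pvMoves] using this
  split_ifs with hf
  · have := pv_foldl_len (α := PvSt) (β := String) (fun acc item =>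
      pvMoves.foldl (fun acc item_loc =>
        if item_loc != loc && item != item_loc then
          acc ++ [(f, if item == x then item_loc else x,
                      if item == g then item_loc else g, item_loc)]
        else acc) acc) 2 ?_ [x, g]
        (pvMoves.foldl (fun acc f_loc =>
          if f_loc != loc then
            (if x == g && f == f_loc then acc else acc ++ [(f, x, g, f_loc)])
          else acc) [])
    · exact le_trans this (le_trans (Nat.add_le_add_right hn1 (2 * [x, g].length)) (by norm_num))
    · intro a b
      have hs : ∀ (a' : List PvSt) (b' : String), ((if b' != loc && b != b' then a' ++ [(f, if b == x then b' else x, if b == g then b' else g, b')] else a')).length ≤ a'.length + 1 := by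
        intro a' b'; split_ifs <;> simp
      have := pv_foldl_len (fun acc item_loc => if item_loc != loc && b != item_loc then acc ++ [(f, if b == x then item_loc else x, if b == g then item_loc else g, item_loc)] else acc) 1 hs pvMoves a
      simpa [pvMoves] using this
  · omega


-- the 27-element universe of states the search can ever hold
def pvU (fox farmer grain start : String) : List PvSt :=
  ([farmer, "left", "right"]).flatMap (fun x =>
    ([grain, "left", "right"]).flatMap (fun g =>
      ([start, "left", "right"]).map (fun l => (fox, x, g, l))))

theorem pvU_mem (fox farmer grain start : String) (t : PvSt) :
    t ∈ pvU fox farmer grain start ↔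
      t.1 = fox ∧ (t.2.1 = farmer ∨ t.2.1 = "left" ∨ t.2.1 = "right")
        ∧ (t.2.2.1 = grain ∨ t.2.2.1 = "left" ∨ t.2.2.1 = "right")
        ∧ (t.2.2.2 = start ∨ t.2.2.2 = "left" ∨ t.2.2.2 = "right") := by
  obtain ⟨a, b, c, d⟩ := t
  simp only [pvU, List.mem_flatMap, List.mem_map, List.mem_cons, List.not_mem_nil, or_false]
  constructor
  · rintro ⟨x1, hx1, g1, hg1, l, hl, heq⟩
    obtain ⟨rfl, rfl, rfl, rfl⟩ := Prod.mk.injEq .. ▸ (by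
      have h1 := congrArg Prod.fst heq
      have h2 := congrArg (fun p : PvSt => p.2.1) heq
      have h3 := congrArg (fun p : PvSt => p.2.2.1) heq
      have h4 := congrArg (fun p : PvSt => p.2.2.2) heq
      exact ⟨h1, h2, h3, h4⟩ : fox = a ∧ x1 = b ∧ g1 = c ∧ l = d)
    exact ⟨rfl, hx1, hg1, hl⟩
  · rintro ⟨rfl, h2, h3, h4⟩
    exact ⟨b, h2, c, h3, d, h4, rfl⟩

theorem pvU_length (fox farmer grain start : String) : (pvU fox farmer grain start).length = 27 := by
  simp [pvU]

theorem pvU_closed (fox farmer grain start : String) (s t : PvSt)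
    (hs : s ∈ pvU fox farmer grain start) (ht : t ∈ pvTransition s) :
    t ∈ pvU fox farmer grain start := by
  rw [pvU_mem] at hs ⊢
  obtain ⟨e1, e2, e3, e4⟩ := pvTransition_shape s t ht
  obtain ⟨u1, u2, u3, u4⟩ := hs
  refine ⟨e1.trans u1, ?_, ?_, ?_⟩
  · rcases e2 with h | h | h
    · rw [h]; exact u2
    · exact Or.inr (Or.inl h)
    · exact Or.inr (Or.inr h)
  · rcases e3 with h | h | h
    · rw [h]; exact u3
    · exact Or.inr (Or.inl h)
    · exact Or.inr (Or.inr h)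
  · rcases e4 with h | h
    · exact Or.inr (Or.inl h)
    · exact Or.inr (Or.inr h)

-- number of universe entries not yet explored (with multiplicity)
def pvMCnt (U : List PvSt) (ex : PySem.Set PvSt) : Nat :=
  U.countP (fun s => !PySem.Set.contains ex s)

theorem pv_countP_lt {α : Type} (l : List α) (p q : α → Bool)
    (hmono : ∀ x ∈ l, q x = true → p x = true) (x : α) (hx : x ∈ l)
    (hqx : q x = false) (hpx : p x = true) : l.countP q < l.countP p := by
  induction l with
  | nil => simp at hx
  | cons a r ih =>
    rw [List.countP_cons, List.countP_cons]
    rcases List.mem_cons.mp hx with rfl | hx'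
    · have hmono' : r.countP q ≤ r.countP p :=
        List.countP_mono_left (fun y hy => hmono y (List.mem_cons_of_mem _ hy))
      rw [hqx, hpx]
      simp only [Bool.false_eq_true, if_false, if_true]
      omega
    · have hlt := ih (fun y hy => hmono y (List.mem_cons_of_mem _ hy)) hx'
      have hle : (if q a = true then 1 else 0) ≤ (if p a = true then 1 else 0) := by
        by_cases hqa : q a = true
        · rw [if_pos hqa, if_pos (hmono a List.mem_cons_self hqa)]
        · rw [if_neg hqa]; omega
      omega

theorem pvMCnt_add_lt (U : List PvSt) (ex : PySem.Set PvSt) (s : PvSt)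
    (hU : s ∈ U) (hs : s ∉ ex) :
    pvMCnt U (PySem.Set.add ex s) < pvMCnt U ex := by
  apply pv_countP_lt U _ _ ?_ s hU ?_ ?_
  · intro y _ hy
    simp only [Bool.not_eq_true'] at hy ⊢
    cases hc : PySem.Set.contains ex y with
    | false => rfl
    | true =>
      have hmem : y ∈ PySem.Set.add ex s :=
        (PySem.Set.mem_add ex s y).mpr (Or.inl ((PySem.Set.contains_iff ex y).mp hc))
      rw [(PySem.Set.contains_iff _ y).mpr hmem] at hy
      exact absurd hy (by simp)
  · have hmem : s ∈ PySem.Set.add ex s := (PySem.Set.mem_add ex s s).mpr (Or.inr rfl)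
    rw [(PySem.Set.contains_iff _ s).mpr hmem]
    rfl
  · cases hc : PySem.Set.contains ex s with
    | false => rfl
    | true => exact absurd ((PySem.Set.contains_iff ex s).mp hc) hs

-- fuel-stability of A's loop: any two fuels above the canonical bound agree
theorem pvGoA_stable (goal : PvSt) (U : List PvSt)
    (hcl : ∀ s ∈ U, ∀ t ∈ pvTransition s, t ∈ U) :
    ∀ (m : Nat), ∀ (q : List PvEnt) (ex : PySem.Set PvSt) (n₁ n₂ : Nat),
      (∀ e ∈ q, (e : PvEnt).1 ∈ U) →
      q.length + 7 * pvMCnt U ex ≤ m → m ≤ n₁ → m ≤ n₂ →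
      pvGoA goal n₁ q ex = pvGoA goal n₂ q ex := by
  intro m
  induction m using Nat.strong_induction_on with
  | _ m ih =>
    intro q ex n₁ n₂ hq hb h1 h2
    match q with
    | [] => rw [pvGoA_nil, pvGoA_nil]
    | (s, p) :: rest =>
      have hlb : rest.length + 1 + 7 * pvMCnt U ex ≤ m := by simpa using hb
      obtain ⟨a, rfl⟩ : ∃ a, n₁ = a + 1 := ⟨n₁ - 1, by omega⟩
      obtain ⟨b, rfl⟩ : ∃ b, n₂ = b + 1 := ⟨n₂ - 1, by omega⟩
      rw [pvGoA_step, pvGoA_step]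
      by_cases hg : (s == goal) = true
      · rw [if_pos hg, if_pos hg]
      · rw [if_neg hg, if_neg hg]
        by_cases he : PySem.Set.contains ex s = true
        · rw [if_pos he, if_pos he]
          exact ih (m - 1) (by omega) rest ex a b
            (fun e he' => hq e (List.mem_cons_of_mem _ he')) (by omega) (by omega) (by omega)
        · rw [if_neg he, if_neg he]
          have hsU : s ∈ U := hq (s, p) List.mem_cons_self
          have hnm : s ∉ ex := fun hmem => he ((PySem.Set.contains_iff ex s).mpr hmem)
          have hlt := pvMCnt_add_lt U ex s hsU hnm
          have hlen : ((pvTransition s).map (fun ns => (ns, p ++ [ns.2.2.2]))).length ≤ 6 := by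
            simpa using pvTransition_len s
          apply ih (m - 1) (by omega) _ _ a b
          · intro e he'
            rcases List.mem_append.mp he' with h' | h'
            · exact hq e (List.mem_cons_of_mem _ h')
            · rcases List.mem_map.mp h' with ⟨ns, hns, rfl⟩
              exact hcl s hsU ns hns
          · simp only [List.length_append]
            omega
          · omega
          · omega

-- processing one whole goal-free level of A's queue
def pvExLev (ex : PySem.Set PvSt) : List PvEnt → PySem.Set PvSt × List PvEnt
  | [] => (ex, [])
  | (s, p) :: r =>
      if PySem.Set.contains ex s then pvExLev ex r
      else
        let q := pvExLev (PySem.Set.add ex s) r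
        (q.1, (pvTransition s).map (fun ns => (ns, p ++ [ns.2.2.2])) ++ q.2)

theorem pvGoA_level (goal : PvSt) :
    ∀ (cur : List PvEnt), ∀ (next : List PvEnt) (ex : PySem.Set PvSt) (n : Nat),
      (∀ e ∈ cur, ((e : PvEnt).1 == goal) = false) →
      pvGoA goal (cur.length + n) (cur ++ next) ex
        = pvGoA goal n (next ++ (pvExLev ex cur).2) (pvExLev ex cur).1 := by
  intro cur
  induction cur with
  | nil => intro next ex n _; simp [pvExLev]
  | cons e r ih =>
    obtain ⟨s, p⟩ := e
    intro next ex n hng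
    have hg : (s == goal) = false := hng (s, p) List.mem_cons_self
    have hng' : ∀ e ∈ r, ((e : PvEnt).1 == goal) = false :=
      fun e he => hng e (List.mem_cons_of_mem _ he)
    have hstep : ((s, p) :: r).length + n = (r.length + n) + 1 := by
      simp [List.length_cons]; omega
    rw [hstep, List.cons_append, pvGoA_step, if_neg (by rw [hg]; exact Bool.false_ne_true)]
    by_cases he : PySem.Set.contains ex s = true
    · rw [if_pos he, ih next ex n hng']
      simp only [pvExLev, he, if_true]
    · rw [if_neg he, List.append_assoc,
        ih (next ++ (pvTransition s).map (fun ns => (ns, p ++ [ns.2.2.2]))) (PySem.Set.add ex s) n hng']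
      simp only [pvExLev, he, Bool.false_eq_true, if_false, List.append_assoc]

theorem pvGoA_hit (goal : PvSt) (d : Nat) :
    ∀ (cur : List PvEnt), ∀ (next : List PvEnt) (ex : PySem.Set PvSt) (n : Nat),
      cur.length ≤ n → (∀ e ∈ cur, (e : PvEnt).2.length = d) →
      (∃ e ∈ cur, ((e : PvEnt).1 == goal) = true) →
      ∃ p, pvGoA goal n (cur ++ next) ex = some p ∧ p.length = d := by
  intro cur
  induction cur with
  | nil => intro next ex n _ _ hex; simp at hex
  | cons e r ih =>
    obtain ⟨s, p⟩ := e
    intro next ex n hn hlen hex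
    obtain ⟨a, rfl⟩ : ∃ a, n = a + 1 := ⟨n - 1, by simp at hn; omega⟩
    rw [List.cons_append, pvGoA_step]
    by_cases hg : (s == goal) = true
    · rw [if_pos hg]
      exact ⟨p, rfl, hlen (s, p) List.mem_cons_self⟩
    · rw [if_neg hg]
      have hex' : ∃ e ∈ r, ((e : PvEnt).1 == goal) = true := by
        rcases hex with ⟨e', he', hge⟩
        rcases List.mem_cons.mp he' with rfl | h'
        · exact absurd hge hg
        · exact ⟨e', h', hge⟩
      have hlen' : ∀ e ∈ r, (e : PvEnt).2.length = d :=
        fun e he => hlen e (List.mem_cons_of_mem _ he)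
      have hn' : r.length ≤ a := by simp at hn; omega
      by_cases he : PySem.Set.contains ex s = true
      · rw [if_pos he]; exact ih next ex a hn' hlen' hex'
      · rw [if_neg he, List.append_assoc]
        exact ih _ (PySem.Set.add ex s) a hn' hlen' hex'

-- final explored set of a level = old explored plus the level's states
theorem pvExLev_fst_mem (ex : PySem.Set PvSt) (cur : List PvEnt) (t : PvSt) :
    t ∈ (pvExLev ex cur).1 ↔ t ∈ ex ∨ t ∈ cur.map Prod.fst := by
  induction cur generalizing ex with
  | nil => simp [pvExLev]
  | cons e r ih =>
    obtain ⟨s, p⟩ := e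
    by_cases he : PySem.Set.contains ex s = true
    · have hmem : s ∈ ex := (PySem.Set.contains_iff ex s).mp he
      simp only [pvExLev, he, if_true, ih, List.map_cons, List.mem_cons]
      constructor
      · rintro (h | h)
        · exact Or.inl h
        · exact Or.inr (Or.inr h)
      · rintro (h | rfl | h)
        · exact Or.inl h
        · exact Or.inl hmem
        · exact Or.inr h
    · simp only [pvExLev, he, Bool.false_eq_true, if_false, ih, List.map_cons, List.mem_cons,
        PySem.Set.mem_add]
      constructor
      · rintro ((h | rfl) | h)
        · exact Or.inl h
        · exact Or.inr (Or.inl rfl)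
        · exact Or.inr (Or.inr h)
      · rintro (h | rfl | h)
        · exact Or.inl (Or.inl h)
        · exact Or.inl (Or.inr rfl)
        · exact Or.inr h

-- forward shape of the produced next level (entry-wise)
theorem pvExLev_snd_forward (ex : PySem.Set PvSt) (cur : List PvEnt) (e : PvEnt)
    (he : e ∈ (pvExLev ex cur).2) :
    ∃ s p, (s, p) ∈ cur ∧ s ∉ ex
      ∧ ∃ ns ∈ pvTransition s, e = (ns, p ++ [ns.2.2.2]) := by
  induction cur generalizing ex with
  | nil => simp [pvExLev] at he
  | cons e' r ih =>
    obtain ⟨s, p⟩ := e'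
    by_cases hc : PySem.Set.contains ex s = true
    · have hmem0 : s ∈ ex := (PySem.Set.contains_iff ex s).mp hc
      rw [show pvExLev ex ((s, p) :: r) = pvExLev ex r by simp [pvExLev, hmem0]] at he
      obtain ⟨s', p', hmem, hnx, hns⟩ := ih ex he
      exact ⟨s', p', List.mem_cons_of_mem _ hmem, hnx, hns⟩
    · have hnx0 : s ∉ ex := fun hmem => hc ((PySem.Set.contains_iff ex s).mpr hmem)
      rw [show pvExLev ex ((s, p) :: r)
          = ((pvExLev (PySem.Set.add ex s) r).1,
             (pvTransition s).map (fun ns => (ns, p ++ [ns.2.2.2]))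
               ++ (pvExLev (PySem.Set.add ex s) r).2) by simp [pvExLev, hnx0]] at he
      rcases List.mem_append.mp he with h | h
      · rcases List.mem_map.mp h with ⟨ns, hns, rfl⟩
        exact ⟨s, p, List.mem_cons_self,
          fun hmem => hc ((PySem.Set.contains_iff ex s).mpr hmem), ns, hns, rfl⟩
      · obtain ⟨s', p', hmem, hnx, hns⟩ := ih (PySem.Set.add ex s) h
        refine ⟨s', p', List.mem_cons_of_mem _ hmem, ?_, hns⟩
        intro hmem'
        exact hnx ((PySem.Set.mem_add ex s s').mpr (Or.inl hmem'))

-- state-level membership of the produced next level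
theorem pvExLev_snd_states (ex : PySem.Set PvSt) (cur : List PvEnt) (t : PvSt) :
    t ∈ (pvExLev ex cur).2.map Prod.fst
      ↔ ∃ s ∈ cur.map Prod.fst, s ∉ ex ∧ t ∈ pvTransition s := by
  induction cur generalizing ex with
  | nil => simp [pvExLev]
  | cons e r ih =>
    obtain ⟨s, p⟩ := e
    by_cases hc : PySem.Set.contains ex s = true
    · have hmem : s ∈ ex := (PySem.Set.contains_iff ex s).mp hc
      rw [show pvExLev ex ((s, p) :: r) = pvExLev ex r by simp [pvExLev, hmem]]
      rw [ih]
      simp only [List.map_cons, List.mem_cons]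
      constructor
      · rintro ⟨s', hs', hnx, ht⟩
        exact ⟨s', Or.inr hs', hnx, ht⟩
      · rintro ⟨s', hs', hnx, ht⟩
        rcases hs' with rfl | hs'
        · exact absurd hmem hnx
        · exact ⟨s', hs', hnx, ht⟩
    · have hnx : s ∉ ex := fun hmem => hc ((PySem.Set.contains_iff ex s).mpr hmem)
      rw [show pvExLev ex ((s, p) :: r)
          = ((pvExLev (PySem.Set.add ex s) r).1,
             (pvTransition s).map (fun ns => (ns, p ++ [ns.2.2.2]))
               ++ (pvExLev (PySem.Set.add ex s) r).2) by simp [pvExLev, hnx]]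
      simp only [List.map_append, List.mem_append, List.map_map, List.map_cons, List.mem_cons]
      rw [ih]
      constructor
      · rintro (h | ⟨s', hs', hnx', ht⟩)
        · rcases List.mem_map.mp h with ⟨ns, hns, rfl⟩
          exact ⟨s, Or.inl rfl, hnx, hns⟩
        · refine ⟨s', Or.inr hs', fun hmem => hnx' ((PySem.Set.mem_add ex s s').mpr (Or.inl hmem)), ht⟩
      · rintro ⟨s', hs', hnx', ht⟩
        rcases hs' with rfl | hs'
        · exact Or.inl (List.mem_map.mpr ⟨t, ht, rfl⟩)
        · by_cases hss : s' = s
          · subst hss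
            exact Or.inl (List.mem_map.mpr ⟨t, ht, rfl⟩)
          · refine Or.inr ⟨s', hs', ?_, ht⟩
            intro hmem
            rcases (PySem.Set.mem_add ex s s').mp hmem with h' | h'
            · exact hnx' h'
            · exact hss h'

-- size of the next level, paid for by newly explored states
theorem pvExLev_snd_length (U : List PvSt) (ex : PySem.Set PvSt) (cur : List PvEnt)
    (hU : ∀ e ∈ cur, (e : PvEnt).1 ∈ U) :
    (pvExLev ex cur).2.length + 7 * pvMCnt U (pvExLev ex cur).1 ≤ 7 * pvMCnt U ex := by
  induction cur generalizing ex with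
  | nil => simp [pvExLev]
  | cons e r ih =>
    obtain ⟨s, p⟩ := e
    have hU' : ∀ e ∈ r, (e : PvEnt).1 ∈ U := fun e he => hU e (List.mem_cons_of_mem _ he)
    by_cases hc : PySem.Set.contains ex s = true
    · have hmem0 : s ∈ ex := (PySem.Set.contains_iff ex s).mp hc
      rw [show pvExLev ex ((s, p) :: r) = pvExLev ex r by simp [pvExLev, hmem0]]
      exact ih ex hU'
    · have hnx : s ∉ ex := fun hmem => hc ((PySem.Set.contains_iff ex s).mpr hmem)
      have hlt := pvMCnt_add_lt U ex s (hU (s, p) List.mem_cons_self) hnx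
      have hrec := ih (PySem.Set.add ex s) hU'
      have hlen : ((pvTransition s).map (fun ns : PvSt => (ns, p ++ [ns.2.2.2]))).length ≤ 6 := by
        simpa using pvTransition_len s
      rw [show pvExLev ex ((s, p) :: r)
          = ((pvExLev (PySem.Set.add ex s) r).1,
             (pvTransition s).map (fun ns => (ns, p ++ [ns.2.2.2]))
               ++ (pvExLev (PySem.Set.add ex s) r).2) by simp [pvExLev, hnx]]
      simp only [List.length_append]
      omega

-- canonical level sequence of A's search
def pvLv (init : PvSt) : Nat → PySem.Set PvSt × List PvEnt
  | 0 => (PySem.Set.empty, [(init, [])])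
  | n + 1 => pvExLev (pvLv init n).1 (pvLv init n).2

-- canonical generation sequence of B's loop
def pvFr (init : PvSt) : Nat → PySem.Set PvSt
  | 0 => PySem.Set.ofList [init]
  | n + 1 => pvNextB (pvFr init n)

theorem pvFr_mem (init : PvSt) (k : Nat) (t : PvSt) :
    t ∈ pvFr init (k + 1) ↔ ∃ s ∈ pvFr init k, t ∈ pvTransition s := by
  show t ∈ pvNextB (pvFr init k) ↔ _
  simp [pvNextB, PySem.Set.mem_ofList, List.mem_flatMap, pvSuccB_eq_transition]

theorem pvGoB_step (goal : PvSt) (n : Nat) (F : PySem.Set PvSt) (d : Int) :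
    pvGoB goal (n + 1) F d
      = if PySem.Set.contains F goal then some d else pvGoB goal n (pvNextB F) (d + 1) := rfl

-- strict decrease of the unexplored count across a level with an unexplored state
theorem pvLv_mcnt_dec (U : List PvSt) (init : PvSt) (j : Nat)
    (hlvU : ∀ e ∈ (pvLv init j).2, (e : PvEnt).1 ∈ U)
    (hw : ∃ s ∈ (pvLv init j).2.map Prod.fst, s ∉ (pvLv init j).1) :
    pvMCnt U (pvLv init (j + 1)).1 < pvMCnt U (pvLv init j).1 := by
  obtain ⟨s, hsmem, hnx⟩ := hw
  have hsU : s ∈ U := by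
    rcases List.mem_map.mp hsmem with ⟨e, he, rfl⟩
    exact hlvU e he
  have hmem' : s ∈ (pvLv init (j + 1)).1 := by
    show s ∈ (pvExLev (pvLv init j).1 (pvLv init j).2).1
    exact (pvExLev_fst_mem _ _ s).mpr (Or.inr hsmem)
  apply pv_countP_lt U _ _ ?_ s hsU ?_ ?_
  · intro y _ hy
    simp only [Bool.not_eq_true'] at hy ⊢
    cases hc : PySem.Set.contains (pvLv init j).1 y with
    | false => rfl
    | true =>
      have : y ∈ (pvLv init (j + 1)).1 := by
        show y ∈ (pvExLev (pvLv init j).1 (pvLv init j).2).1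
        exact (pvExLev_fst_mem _ _ y).mpr (Or.inl ((PySem.Set.contains_iff _ y).mp hc))
      rw [(PySem.Set.contains_iff _ y).mpr this] at hy
      exact absurd hy (by simp)
  · rw [(PySem.Set.contains_iff _ s).mpr hmem']
    rfl
  · cases hc : PySem.Set.contains (pvLv init j).1 s with
    | false => rfl
    | true => exact absurd ((PySem.Set.contains_iff _ s).mp hc) hnx

-- the main equivalence off the changed region: both programs report the first
-- generation in which the goal state appears (or none)
theorem pvMain (fox farmer grain start end_ : String) (hne : start ≠ end_) :
    fox_farmer_grain_graph_search start end_ fox farmer grain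
      = fox_farmer_grain_graph_search_alt start end_ fox farmer grain := by
  classical
  let U : List PvSt := pvU fox farmer grain start
  let init : PvSt := (fox, farmer, grain, start)
  let goal : PvSt := (fox, farmer, grain, end_)
  have hinitU : init ∈ U := by
    rw [show U = pvU fox farmer grain start from rfl, pvU_mem]
    exact ⟨rfl, Or.inl rfl, Or.inl rfl, Or.inl rfl⟩
  have hcl : ∀ s ∈ U, ∀ t ∈ pvTransition s, t ∈ U :=
    fun s hs t ht => pvU_closed fox farmer grain start s t hs ht
  have hig : init ≠ goal := by
    intro h
    exact hne (congrArg (fun t : PvSt => t.2.2.2) h)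
  have hdefLv : ∀ j, pvLv init (j + 1) = pvExLev (pvLv init j).1 (pvLv init j).2 :=
    fun j => rfl
  have hlvU : ∀ j, ∀ e ∈ (pvLv init j).2, (e : PvEnt).1 ∈ U := by
    intro j
    induction j with
    | zero =>
      intro e he
      have : e = (init, []) := by simpa [pvLv] using he
      rw [this]; exact hinitU
    | succ j ih =>
      intro e he
      rw [hdefLv j] at he
      obtain ⟨s, p, hmem, _, ns, hns, rfl⟩ := pvExLev_snd_forward _ _ e he
      exact hcl s (ih (s, p) hmem) ns hns
  have hlvLen : ∀ j, ∀ e ∈ (pvLv init j).2, (e : PvEnt).2.length = j := by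
    intro j
    induction j with
    | zero =>
      intro e he
      have : e = (init, []) := by simpa [pvLv] using he
      rw [this]; rfl
    | succ j ih =>
      intro e he
      rw [hdefLv j] at he
      obtain ⟨s, p, hmem, _, ns, hns, rfl⟩ := pvExLev_snd_forward _ _ e he
      have := ih (s, p) hmem
      simp at this ⊢
      omega
  have hlvEx : ∀ j t, t ∈ (pvLv init j).1 ↔ ∃ i, i < j ∧ t ∈ (pvLv init i).2.map Prod.fst := by
    intro j
    induction j with
    | zero =>
      intro t
      constructor
      · intro h; exact absurd h (by simp [pvLv, PySem.Set.empty])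
      · rintro ⟨i, hi, _⟩; omega
    | succ j ih =>
      intro t
      rw [show (pvLv init (j + 1)).1 = (pvExLev (pvLv init j).1 (pvLv init j).2).1 from rfl,
        pvExLev_fst_mem, ih]
      constructor
      · rintro (⟨i, hi, h⟩ | h)
        · exact ⟨i, by omega, h⟩
        · exact ⟨j, by omega, h⟩
      · rintro ⟨i, hi, h⟩
        rcases Nat.lt_succ_iff_lt_or_eq.mp hi with h' | rfl
        · exact Or.inl ⟨i, h', h⟩
        · exact Or.inr h
  have hempty_succ : ∀ j, (pvLv init j).2 = [] → (pvLv init (j + 1)).2 = [] := by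
    intro j h
    rw [hdefLv j, h]
    rfl
  have hempty_ge : ∀ k j, j ≤ k → (pvLv init j).2 = [] → (pvLv init k).2 = [] := by
    intro k
    induction k with
    | zero =>
      intro j hj h
      have hj0 : j = 0 := by omega
      subst hj0
      exact h
    | succ k ih =>
      intro j hj h
      by_cases hjk : j ≤ k
      · exact hempty_succ k (ih j hjk h)
      · have hj1 : j = k + 1 := by omega
        subst hj1
        exact h
  have hstuck : ∀ j, (¬ ∃ s ∈ (pvLv init j).2.map Prod.fst, s ∉ (pvLv init j).1) →
      (pvLv init (j + 1)).2 = [] := by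
    intro j h
    apply List.eq_nil_iff_forall_not_mem.mpr
    intro e he
    rw [hdefLv j] at he
    obtain ⟨s, p, hmem, hnx, _⟩ := pvExLev_snd_forward _ _ e he
    exact h ⟨s, List.mem_map.mpr ⟨(s, p), hmem, rfl⟩, hnx⟩
  have hstep : ∀ j, (∀ e ∈ (pvLv init j).2, ((e : PvEnt).1 == goal) = false) →
      pvGoA goal ((pvLv init j).2.length + 7 * pvMCnt U (pvLv init j).1) (pvLv init j).2 (pvLv init j).1
        = pvGoA goal ((pvLv init (j + 1)).2.length + 7 * pvMCnt U (pvLv init (j + 1)).1)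
            (pvLv init (j + 1)).2 (pvLv init (j + 1)).1 := by
    intro j hng
    have h1 := pvGoA_level goal (pvLv init j).2 [] (pvLv init j).1 (7 * pvMCnt U (pvLv init j).1) hng
    rw [List.append_nil, List.nil_append] at h1
    rw [h1, ← hdefLv j]
    exact pvGoA_stable goal U hcl
      ((pvLv init (j + 1)).2.length + 7 * pvMCnt U (pvLv init (j + 1)).1)
      (pvLv init (j + 1)).2 (pvLv init (j + 1)).1 _ _ (hlvU (j + 1))
      le_rfl (by have := pvExLev_snd_length U (pvLv init j).1 (pvLv init j).2 (hlvU j); rw [← hdefLv j] at this; omega) le_rfl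
  have hchain : ∀ j, (∀ i, i < j → ∀ e ∈ (pvLv init i).2, ((e : PvEnt).1 == goal) = false) →
      pvGoA goal ((pvLv init 0).2.length + 7 * pvMCnt U (pvLv init 0).1) (pvLv init 0).2 (pvLv init 0).1
        = pvGoA goal ((pvLv init j).2.length + 7 * pvMCnt U (pvLv init j).1) (pvLv init j).2 (pvLv init j).1 := by
    intro j
    induction j with
    | zero => intro _; rfl
    | succ j ih =>
      intro h
      rw [ih (fun i hi => h i (by omega))]
      exact hstep j (h j (by omega))
  have hm0 : pvMCnt U (pvLv init 0).1 ≤ 27 := by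
    calc pvMCnt U (pvLv init 0).1 ≤ U.length := List.countP_le_length
      _ = 27 := pvU_length fox farmer grain start
  have hlen0 : (pvLv init 0).2.length = 1 := rfl
  have htop : pvGoA goal 500 [(init, [])] PySem.Set.empty
      = pvGoA goal ((pvLv init 0).2.length + 7 * pvMCnt U (pvLv init 0).1) (pvLv init 0).2 (pvLv init 0).1 := by
    exact pvGoA_stable goal U hcl
      ((pvLv init 0).2.length + 7 * pvMCnt U (pvLv init 0).1)
      (pvLv init 0).2 (pvLv init 0).1 500 _ (hlvU 0) le_rfl (by omega) le_rfl
  have ha : ∀ d, ∀ t ∈ (pvLv init d).2.map Prod.fst, t ∈ pvFr init d := by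
    intro d
    induction d with
    | zero =>
      intro t ht
      have : t = init := by simpa [pvLv] using ht
      rw [this]
      simp [pvFr, PySem.Set.mem_ofList]
    | succ d ih =>
      intro t ht
      rw [hdefLv d] at ht
      obtain ⟨s, hs, _, hts⟩ := (pvExLev_snd_states _ _ t).mp ht
      exact (pvFr_mem init d t).mpr ⟨s, ih s hs, hts⟩
  have hb2 : ∀ l t, t ∈ pvFr init l → ∃ j, j ≤ l ∧ t ∈ (pvLv init j).2.map Prod.fst := by
    intro l
    induction l with
    | zero =>
      intro t ht
      have : t = init := by simpa [pvFr, PySem.Set.mem_ofList] using ht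
      rw [this]
      exact ⟨0, le_rfl, by simp [pvLv]⟩
    | succ l ih =>
      intro t ht
      obtain ⟨s, hs, hts⟩ := (pvFr_mem init l t).mp ht
      obtain ⟨j, hj, hsj⟩ := ih s hs
      have hex : ∃ i, s ∈ (pvLv init i).2.map Prod.fst := ⟨j, hsj⟩
      have hi0 : s ∈ (pvLv init (Nat.find hex)).2.map Prod.fst := Nat.find_spec hex
      have hi0le : Nat.find hex ≤ j := Nat.find_min' hex hsj
      have hnx : s ∉ (pvLv init (Nat.find hex)).1 := by
        intro hmem
        obtain ⟨i, hi, h'⟩ := (hlvEx (Nat.find hex) s).mp hmem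
        exact Nat.find_min hex hi h'
      refine ⟨Nat.find hex + 1, by omega, ?_⟩
      rw [hdefLv (Nat.find hex)]
      exact (pvExLev_snd_states _ _ t).mpr ⟨s, hi0, hnx, hts⟩
  have hBsome : ∀ r : Nat, ∀ k n : Nat, ∀ d : Int,
      (∀ i, i < r → goal ∉ pvFr init (k + i)) → goal ∈ pvFr init (k + r) → r < n →
      pvGoB goal n (pvFr init k) d = some (d + r) := by
    intro r
    induction r with
    | zero =>
      intro k n d _ hgl hn
      obtain ⟨n', rfl⟩ : ∃ n', n = n' + 1 := ⟨n - 1, by omega⟩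
      rw [pvGoB_step,
        if_pos ((PySem.Set.contains_iff _ goal).mpr (by simpa using hgl))]
      simp
    | succ r ihr =>
      intro k n d h hgl hn
      have hg0 : goal ∉ pvFr init k := by simpa using h 0 (by omega)
      obtain ⟨n', rfl⟩ : ∃ n', n = n' + 1 := ⟨n - 1, by omega⟩
      rw [pvGoB_step, if_neg (by
        intro hcont
        exact hg0 ((PySem.Set.contains_iff _ goal).mp hcont)),
        show pvNextB (pvFr init k) = pvFr init (k + 1) from rfl]
      have hh := ihr (k + 1) n' (d + 1)
        (fun i hi => by
          have := h (i + 1) (by omega)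
          rwa [show k + (i + 1) = k + 1 + i by omega] at this)
        (by rwa [show k + (r + 1) = k + 1 + r by omega] at hgl)
        (by omega)
      rw [hh]
      congr 1
      push_cast
      ring
  have hBnone : ∀ n k : Nat, ∀ d : Int, (∀ i, goal ∉ pvFr init i) →
      pvGoB goal n (pvFr init k) d = none := by
    intro n
    induction n with
    | zero => intro k d _; rfl
    | succ n ih =>
      intro k d h
      rw [pvGoB_step, if_neg (by
        intro hcont
        exact h k ((PySem.Set.contains_iff _ goal).mp hcont)),
        show pvNextB (pvFr init k) = pvFr init (k + 1) from rfl]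
      exact ih (k + 1) (d + 1) h
  have hAport : fox_farmer_grain_graph_search start end_ fox farmer grain
      = (match pvGoA goal 500 [(init, [])] PySem.Set.empty with
         | none => none
         | some p => if p == [] then none else some (p.length : Int)) := rfl
  have hBport : fox_farmer_grain_graph_search_alt start end_ fox farmer grain
      = pvGoB goal 28 (pvFr init 0) 0 := rfl
  by_cases hEx : ∃ d, goal ∈ (pvLv init d).2.map Prod.fst
  · have hd0 : goal ∈ (pvLv init (Nat.find hEx)).2.map Prod.fst := Nat.find_spec hEx
    have hgfree : ∀ i, i < Nat.find hEx → ∀ e ∈ (pvLv init i).2, ((e : PvEnt).1 == goal) = false := by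
      intro i hi e he
      cases hbe : (e : PvEnt).1 == goal with
      | false => rfl
      | true =>
        exfalso
        exact Nat.find_min hEx hi (List.mem_map.mpr ⟨e, he, eq_of_beq hbe⟩)
    have hd0pos : Nat.find hEx ≠ 0 := by
      intro h0
      rw [h0] at hd0
      have : goal = init := by simpa [pvLv] using hd0
      exact hig this.symm
    have hwit : ∀ i, i < Nat.find hEx → ∃ s ∈ (pvLv init i).2.map Prod.fst, s ∉ (pvLv init i).1 := by
      intro i hi
      by_contra hno
      have hE : (pvLv init (i + 1)).2 = [] := hstuck i hno
      have : (pvLv init (Nat.find hEx)).2 = [] := hempty_ge _ (i + 1) (by omega) hE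
      rw [this] at hd0
      simp at hd0
    have hbound : ∀ i, i ≤ Nat.find hEx → pvMCnt U (pvLv init i).1 + i ≤ 27 := by
      intro i
      induction i with
      | zero => intro _; simpa using hm0
      | succ i ihi =>
        intro hi
        have h1 := ihi (by omega)
        have h2 := pvLv_mcnt_dec U init i (hlvU i) (hwit i (by omega))
        omega
    have hd27 : Nat.find hEx ≤ 27 := by
      have := hbound (Nat.find hEx) le_rfl
      omega
    have hAval : ∃ p, pvGoA goal 500 [(init, [])] PySem.Set.empty = some p
        ∧ p.length = Nat.find hEx := by
      rw [htop, hchain (Nat.find hEx) hgfree]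
      have hhit := pvGoA_hit goal (Nat.find hEx) (pvLv init (Nat.find hEx)).2 []
        (pvLv init (Nat.find hEx)).1
        ((pvLv init (Nat.find hEx)).2.length + 7 * pvMCnt U (pvLv init (Nat.find hEx)).1)
        (by omega) (hlvLen (Nat.find hEx)) ?_
      · rwa [List.append_nil] at hhit
      · rcases List.mem_map.mp hd0 with ⟨e, he, heq⟩
        exact ⟨e, he, by rw [heq]; exact beq_self_eq_true goal⟩
    have hfrEx : ∃ j, goal ∈ pvFr init j := ⟨Nat.find hEx, ha _ goal hd0⟩
    have hj0d0 : Nat.find hfrEx = Nat.find hEx := by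
      apply le_antisymm
      · exact Nat.find_min' hfrEx (ha _ goal hd0)
      · obtain ⟨j, hj, hjmem⟩ := hb2 (Nat.find hfrEx) goal (Nat.find_spec hfrEx)
        have := Nat.find_min' hEx hjmem
        omega
    have hBval : pvGoB goal 28 (pvFr init 0) 0 = some ((Nat.find hEx : Nat) : Int) := by
      have := hBsome (Nat.find hfrEx) 0 28 0
        (fun i hi => by
          have := Nat.find_min hfrEx (show i < Nat.find hfrEx from hi)
          simpa using this)
        (by simpa using Nat.find_spec hfrEx)
        (by omega)
      rw [this, hj0d0]
      simp
    obtain ⟨p, hp, hplen⟩ := hAval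
    rw [hAport, hBport, hp, hBval]
    show (if p == [] then none else some (p.length : Int)) = some ((Nat.find hEx : Nat) : Int)
    have hpne : (p == []) = false := by
      cases hbe : p == [] with
      | false => rfl
      | true =>
        exfalso
        have : p = [] := eq_of_beq hbe
        rw [this] at hplen
        exact hd0pos (by simpa using hplen.symm)
    rw [if_neg (by rw [hpne]; exact Bool.false_ne_true)]
    rw [hplen]
  · have hnoA : pvGoA goal 500 [(init, [])] PySem.Set.empty = none := by
      rw [htop]
      have hgfreeall : ∀ i, ∀ e ∈ (pvLv init i).2, ((e : PvEnt).1 == goal) = false := by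
        intro i e he
        cases hbe : (e : PvEnt).1 == goal with
        | false => rfl
        | true =>
          exfalso
          exact hEx ⟨i, List.mem_map.mpr ⟨e, he, eq_of_beq hbe⟩⟩
      suffices h : ∀ m j, pvMCnt U (pvLv init j).1 ≤ m →
          pvGoA goal ((pvLv init j).2.length + 7 * pvMCnt U (pvLv init j).1)
            (pvLv init j).2 (pvLv init j).1 = none from h _ 0 le_rfl
      intro m
      induction m using Nat.strong_induction_on with
      | _ m ih =>
        intro j hm
        by_cases hE : (pvLv init j).2 = []
        · rw [hE, pvGoA_nil]
        · rw [hstep j (hgfreeall j)]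
          by_cases hw : ∃ s ∈ (pvLv init j).2.map Prod.fst, s ∉ (pvLv init j).1
          · have hlt := pvLv_mcnt_dec U init j (hlvU j) hw
            exact ih (m - 1) (by omega) (j + 1) (by omega)
          · rw [hstuck j hw, pvGoA_nil]
    have hnoB : pvGoB goal 28 (pvFr init 0) 0 = none := by
      apply hBnone
      intro i hmem
      obtain ⟨j, _, hjm⟩ := hb2 i goal hmem
      exact hEx ⟨j, hjm⟩
    rw [hAport, hBport, hnoA, hnoB]

-- ===== VERDICT (by name: the statement is the Claim_ definition above) =====
theorem fox_farmer_grain_graph_search_spec : Claim_unchanged_fox_farmer_grain_graph_search := by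
  intro start end_ fox farmer grain _ hD
  exact pvMain fox farmer grain start end_ hD

theorem fox_farmer_grain_graph_search_changed : Claim_changed_fox_farmer_grain_graph_search := by
  unfold Claim_changed_fox_farmer_grain_graph_search; decide

theorem fox_farmer_grain_graph_search_tight : Claim_exact_fox_farmer_grain_graph_search := by
  intro start end_ fox farmer grain _ hD
  have h : start = end_ := hD
  subst h
  have hA : fox_farmer_grain_graph_search start start fox farmer grain = none := by
    show (match pvGoA (fox, farmer, grain, start) 500 [((fox, farmer, grain, start), [])] PySem.Set.empty with
          | none => none
          | some p => if p == [] then none else some (p.length : Int)) = none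
    rw [show (500 : Nat) = 499 + 1 from rfl, pvGoA_step, if_pos (beq_self_eq_true _)]
    rfl
  have hB : fox_farmer_grain_graph_search_alt start start fox farmer grain = some 0 := by
    show pvGoB (fox, farmer, grain, start) 28 (PySem.Set.ofList [(fox, farmer, grain, start)]) 0 = some 0
    rw [show (28 : Nat) = 27 + 1 from rfl, pvGoB_step,
      if_pos ((PySem.Set.contains_iff _ _).mpr (by simp [PySem.Set.mem_ofList]))]
  rw [hA, hB]
  simp
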